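-- pv_equiv track=rewrite | github.com/luffy2106/bigO_coding | Lecture8_Dijkstra/Commandos.py | validate_path_visited
-- ===== SOURCE A (Python) =====
-- def validate_path_visited(source, dest, visited_path, path):
--     if source == dest:
--         visited_path[source] = True
--         return visited_path
--     else:
--         visited_path[dest] = True
--         dest = path[dest]
--         return validate_path_visited(source, dest, visited_path, path)
-- ===== SOURCE B (Python) =====
-- def validate_path_visited(source, dest, visited_path, path):
--     # Phase 1: trace the predecessor chain from dest to source.
--     chain = [dest]
--     while chain[-1] != source:
--         chain.append(path[chain[-1]])
--     # Phase 2: rebuild the dict in one pass, then append newly visited nodes.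
--     marked = set(chain)
--     result = {k: v or (k in marked) for k, v in visited_path.items()}
--     for n in chain:
--         if n not in result:
--             result[n] = True
--     return result
-- ===== Notes on version B (the rewrite author's own statement) =====
-- stated objective: alternative
-- what changed: B replaces A's tail recursion that inserts into the dict at every step by a two-phase algorithm: first trace the predecessor chain into a list, then rebuild the dict in a single comprehension pass using the chain as a set and append the newly visited nodes; unlike A, B returns a fresh dict instead of mutating visited_path in place.
import Mathlib
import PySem

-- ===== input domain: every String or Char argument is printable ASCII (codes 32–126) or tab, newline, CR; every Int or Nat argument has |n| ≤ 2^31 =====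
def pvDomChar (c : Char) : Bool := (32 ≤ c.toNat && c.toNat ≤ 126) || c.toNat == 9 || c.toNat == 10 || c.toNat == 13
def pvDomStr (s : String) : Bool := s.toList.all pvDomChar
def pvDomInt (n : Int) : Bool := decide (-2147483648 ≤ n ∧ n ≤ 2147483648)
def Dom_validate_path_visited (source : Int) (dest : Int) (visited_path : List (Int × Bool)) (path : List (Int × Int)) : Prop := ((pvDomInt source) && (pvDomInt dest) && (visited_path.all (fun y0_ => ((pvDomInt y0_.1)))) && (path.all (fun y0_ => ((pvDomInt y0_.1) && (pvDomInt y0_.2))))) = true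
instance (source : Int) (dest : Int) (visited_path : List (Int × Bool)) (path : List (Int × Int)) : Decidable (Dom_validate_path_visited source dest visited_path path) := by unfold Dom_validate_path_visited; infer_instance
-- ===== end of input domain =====

-- B replaces A's insert-at-every-step tail recursion by a two-phase algorithm (trace the chain
-- into a list, then rebuild the dict in one pass and append the new nodes); objective: alternative.
-- A mutates visited_path in place while B builds a fresh dict; the equivalence proved is about the
-- return value only.

-- shared dict lookup: path[k] (none = KeyError)
def pvGet (path : List (Int × Int)) (k : Int) : Option Int :=
  (PySem.Dict.mk path).get? k

-- ===== PORT A =====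
-- visited_path[k] = True on the insertion-ordered dict
def pvIns (vp : List (Int × Bool)) (k : Int) : List (Int × Bool) :=
  ((PySem.Dict.mk vp).insert k true).items

-- A's tail recursion, with fuel path.length+1 (Pre_ guarantees it is never exhausted;
-- when exhausted — only outside Pre_, where Python raises — the current dict is returned)
def pvGoA (fuel : Nat) (source : Int) (dest : Int) (vp : List (Int × Bool)) (path : List (Int × Int)) : List (Int × Bool) :=
  match fuel with
  | 0 => vp
  | n + 1 =>
    if source == dest then pvIns vp source
    else
      let vp' := pvIns vp dest
      match pvGet path dest with
      | some d => pvGoA n source d vp' path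
      | none => vp'   -- Python raises KeyError here; outside Pre_

def validate_path_visited (source : Int) (dest : Int) (visited_path : List (Int × Bool)) (path : List (Int × Int)) : List (Int × Bool) :=
  pvGoA (path.length + 1) source dest visited_path path

-- ===== PORT B =====
-- phase 1 of Source B: chain = [dest]; while chain[-1] != source: chain.append(path[chain[-1]])
-- (fuel path.length+1; exhaustion and a missing key happen only outside Pre_, where Python raises)
def pvChainB (fuel : Nat) (source : Int) (dest : Int) (path : List (Int × Int)) : List Int :=
  match fuel with
  | 0 => [dest]
  | n + 1 =>
    if dest == source then [dest]
    else
      match pvGet path dest with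
      | some d => dest :: pvChainB n source d path
      | none => [dest]   -- Python raises KeyError here; outside Pre_

-- phase 2 of Source B: 'for n in chain: if n not in result: result[n] = True'
def pvAppendNew (r : List (Int × Bool)) (chain : List Int) : List (Int × Bool) :=
  chain.foldl (fun r n => if (PySem.Dict.mk r).contains n then r else r ++ [(n, true)]) r

def validate_path_visited_alt (source : Int) (dest : Int) (visited_path : List (Int × Bool)) (path : List (Int × Int)) : List (Int × Bool) :=
  let chain := pvChainB (path.length + 1) source dest path
  let marked : PySem.Set Int := PySem.Set.ofList chain
  pvAppendNew (visited_path.map (fun kv => (kv.1, kv.2 || PySem.Set.contains marked kv.1))) chain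

-- ===== PRECONDITION & SPEC =====
-- one lookup step in the functional graph 'path' (none = missing key)
def pvStep (path : List (Int × Int)) (o : Option Int) : Option Int := o.bind (pvGet path)

-- Pre_ = exactly the inputs where A returns: source is reachable from dest in the functional
-- graph 'path' in at most path.length lookup steps (otherwise A hits a KeyError or recurses forever).
def Pre_validate_path_visited (source : Int) (dest : Int) (visited_path : List (Int × Bool)) (path : List (Int × Int)) : Prop :=
  ∃ k ≤ path.length, (pvStep path)^[k] (some dest) = some source
instance (source : Int) (dest : Int) (visited_path : List (Int × Bool)) (path : List (Int × Int)) : Decidable (Pre_validate_path_visited source dest visited_path path) := by unfold Pre_validate_path_visited; infer_instance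

def pvWitness_validate_path_visited : Int × Int × (List (Int × Bool)) × (List (Int × Int)) :=
  (0, 1, [(0, false), (1, false)], [(1, 0)])

def Spec_validate_path_visited (source : Int) (dest : Int) (visited_path : List (Int × Bool)) (path : List (Int × Int)) (out : List (Int × Bool)) : Prop := out = validate_path_visited_alt source dest visited_path path
instance (source : Int) (dest : Int) (visited_path : List (Int × Bool)) (path : List (Int × Int)) (out : List (Int × Bool)) : Decidable (Spec_validate_path_visited source dest visited_path path out) := by unfold Spec_validate_path_visited; infer_instance

-- ===== CLAIM (what is proved, stated in full; the proofs are below) =====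
def Claim_equal_validate_path_visited : Prop := ∀ (source : Int) (dest : Int) (visited_path : List (Int × Bool)) (path : List (Int × Int)), Dom_validate_path_visited source dest visited_path path → Pre_validate_path_visited source dest visited_path path → Spec_validate_path_visited source dest visited_path path (validate_path_visited source dest visited_path path)

-- ===== LEMMAS AND PROOFS =====
-- fuel-indexed reachability, the induction form the main lemmas use
def pvReaches (fuel : Nat) (source : Int) (dest : Int) (path : List (Int × Int)) : Bool :=
  match fuel with
  | 0 => dest == source
  | n + 1 =>
    dest == source ||
      match pvGet path dest with
      | some d => pvReaches n source d path
      | none => false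

theorem pvStep_iterate_none (path : List (Int × Int)) (k : Nat) : (pvStep path)^[k] none = none := by
  induction k with
  | zero => rfl
  | succ k ih => rw [Function.iterate_succ_apply]; simpa [pvStep] using ih

theorem pvReaches_of_ex (n : Nat) : ∀ (source dest : Int) (path : List (Int × Int)),
    (∃ k ≤ n, (pvStep path)^[k] (some dest) = some source) → pvReaches n source dest path = true := by
  induction n with
  | zero =>
    intro s d p ⟨k, hk, hit⟩
    interval_cases k
    simp only [Function.iterate_zero, id_eq, Option.some.injEq] at hit
    simp [pvReaches, hit]
  | succ n ih =>
    intro s d p ⟨k, hk, hit⟩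
    match k with
    | 0 =>
      simp only [Function.iterate_zero, id_eq, Option.some.injEq] at hit
      simp [pvReaches, hit]
    | j + 1 =>
      rw [Function.iterate_succ_apply] at hit
      have hstep : pvStep p (some d) = pvGet p d := rfl
      rw [hstep] at hit
      cases hg : pvGet p d with
      | none => rw [hg, pvStep_iterate_none] at hit; exact absurd hit (by simp)
      | some d' =>
        rw [hg] at hit
        have := ih s d' p ⟨j, by omega, hit⟩
        simp [pvReaches, hg, this]

-- key invariant of A: under reachability, A's recursion is folding the insertions over the chain
theorem pvGoA_eq_foldl (n : Nat) : ∀ (source dest : Int) (vp : List (Int × Bool)) (path : List (Int × Int)),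
    pvReaches n source dest path = true →
    pvGoA (n + 1) source dest vp path = (pvChainB (n + 1) source dest path).foldl pvIns vp := by
  induction n with
  | zero =>
    intro source dest vp path h
    simp only [pvReaches] at h
    have hds : dest = source := beq_iff_eq.mp h
    subst hds
    simp [pvGoA, pvChainB]
  | succ n ih =>
    intro source dest vp path h
    simp only [pvReaches] at h
    by_cases hds : dest = source
    · subst hds; simp [pvGoA, pvChainB]
    · have hb : (dest == source) = false := beq_eq_false_iff_ne.mpr hds
      have hb' : (source == dest) = false := beq_eq_false_iff_ne.mpr (Ne.symm hds)
      rw [hb] at h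
      simp only [Bool.false_or] at h
      cases hg : pvGet path dest with
      | none => rw [hg] at h; simp at h
      | some d =>
        rw [hg] at h
        have hA : pvGoA (n + 1 + 1) source dest vp path = pvGoA (n + 1) source d (pvIns vp dest) path := by
          simp [pvGoA, hb', hg]
        have hC : pvChainB (n + 1 + 1) source dest path = dest :: pvChainB (n + 1) source d path := by
          simp [pvChainB, hb, hg]
        rw [hA, hC, List.foldl_cons, ih source d (pvIns vp dest) path h]

-- a key-preserving map does not change dict membership
theorem pvContains_map (vp : List (Int × Bool)) (f : (Int × Bool) → Bool) (k : Int) :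
    (PySem.Dict.mk (vp.map (fun kv => (kv.1, f kv)))).contains k = (PySem.Dict.mk vp).contains k := by
  simp [PySem.Dict.contains, List.any_map, Function.comp_def]

-- key invariant of B: the overwrite-then-append-missing pass computes the insertion fold
theorem pvAppendNew_eq_foldl (c : List Int) : ∀ (vp : List (Int × Bool)),
    pvAppendNew (vp.map (fun kv => (kv.1, kv.2 || c.contains kv.1))) c = c.foldl pvIns vp := by
  induction c with
  | nil => intro vp; simp [pvAppendNew]
  | cons k c ih =>
    intro vp
    show (c.foldl _ (if (PySem.Dict.mk (vp.map _)).contains k then _ else _)) = c.foldl pvIns (pvIns vp k)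
    rw [← ih (pvIns vp k)]
    unfold pvAppendNew
    rw [pvContains_map]
    by_cases hk : (PySem.Dict.mk vp).contains k = true
    · rw [if_pos hk]
      congr 1
      have hins : pvIns vp k = vp.map (fun p => if (p.1 == k) = true then (k, true) else p) :=
        PySem.Dict.items_insert_of_contains (PySem.Dict.mk vp) true hk
      rw [hins, List.map_map]
      apply List.map_congr_left
      intro kv _
      by_cases hkk : kv.1 = k <;> simp [hkk]
    · rw [if_neg hk]
      have hk' : vp.any (fun p => p.1 == k) = false := eq_false_of_ne_true hk
      have hnone : ∀ kv ∈ vp, (kv.1 == k) = false := by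
        simpa [List.any_eq_false] using hk'
      congr 1
      have hins : pvIns vp k = vp ++ [(k, true)] :=
        PySem.Dict.items_insert_of_not_contains (PySem.Dict.mk vp) true (eq_false_of_ne_true hk)
      rw [hins, List.map_append]
      congr 1
      · apply List.map_congr_left
        intro kv hkv
        have h2 : kv.1 ≠ k := by simpa using hnone kv hkv
        simp [h2]

-- membership in a Set built from a list is list membership
theorem pvSetContains_ofList (c : List Int) (x : Int) :
    PySem.Set.contains (PySem.Set.ofList c) x = c.contains x := by
  simp

theorem validate_path_visited_witness_ok :
    Dom_validate_path_visited pvWitness_validate_path_visited.1 pvWitness_validate_path_visited.2.1 pvWitness_validate_path_visited.2.2.1 pvWitness_validate_path_visited.2.2.2 ∧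
    Pre_validate_path_visited pvWitness_validate_path_visited.1 pvWitness_validate_path_visited.2.1 pvWitness_validate_path_visited.2.2.1 pvWitness_validate_path_visited.2.2.2 := by
  decide

-- ===== VERDICT (by name: the statement is the Claim_ definition above) =====
theorem validate_path_visited_spec : Claim_equal_validate_path_visited := by
  intro source dest visited_path path _hdom hpre
  unfold Spec_validate_path_visited validate_path_visited validate_path_visited_alt
  rw [pvGoA_eq_foldl path.length source dest visited_path path
        (pvReaches_of_ex path.length source dest path hpre)]
  rw [← pvAppendNew_eq_foldl (pvChainB (path.length + 1) source dest path) visited_path]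
  simp only [pvSetContains_ofList]
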